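-- pv_equiv track=rewrite | github.com/sschott20/Competitive-Programming | 914/B.py | solve
-- ===== SOURCE A (Python) =====
-- def solve(test):
--     dp = {}
--     prefix = []
--     acc = 0
--     sorted_list = sorted(test)
--
--     for i in sorted_list:
--         if len(prefix) == 0:
--             prefix.append(i)
--         else:
--             prefix.append(prefix[-1] + i)
--     # iterate backwards through the sorted list
--     for i in range(len(sorted_list) - 1, -1, -1):
--         if i == len(sorted_list) - 1:
--             dp[sorted_list[i]] = len(sorted_list) - 1
--         else:
--             pre = prefix[i]
--             val = sorted_list[i]
--             nxt = sorted_list[i + 1]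
--             if pre >= nxt:
--                 dp[val] = dp[nxt]
--             else:
--                 dp[val] = i
--
--     ret = []
--     for i in test:
--         ret.append(dp[i])
--
--     return " ".join(map(str, ret))
-- ===== SOURCE B (Python) =====
-- def solve(test):
--     s = sorted(test)
--     n = len(s)
--     dp = {}
--     run = 0      # prefix sum of s[0..i]
--     seg = []     # values of the current unflushed segment
--     for i, v in enumerate(s):
--         seg.append(v)
--         run += v
--         if i == n - 1 or run < s[i + 1]:
--             # segment break at i: every value first seen in this segment maps to i
--             for w in seg:
--                 dp.setdefault(w, i)
--             seg = []
--     return " ".join(str(dp[x]) for x in test)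
-- ===== Notes on version B (the rewrite author's own statement) =====
-- stated objective: alternative
-- what changed: Replaces A's prefix-sum list plus backward value-keyed DP recurrence (reading dp[next] and overwriting duplicates) by a single forward pass that maintains a running sum, accumulates the current segment, and on each break flushes the whole segment into the dict with setdefault (first occurrence wins), so neither the prefix list nor the backward chained lookup exists.
import Mathlib
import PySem

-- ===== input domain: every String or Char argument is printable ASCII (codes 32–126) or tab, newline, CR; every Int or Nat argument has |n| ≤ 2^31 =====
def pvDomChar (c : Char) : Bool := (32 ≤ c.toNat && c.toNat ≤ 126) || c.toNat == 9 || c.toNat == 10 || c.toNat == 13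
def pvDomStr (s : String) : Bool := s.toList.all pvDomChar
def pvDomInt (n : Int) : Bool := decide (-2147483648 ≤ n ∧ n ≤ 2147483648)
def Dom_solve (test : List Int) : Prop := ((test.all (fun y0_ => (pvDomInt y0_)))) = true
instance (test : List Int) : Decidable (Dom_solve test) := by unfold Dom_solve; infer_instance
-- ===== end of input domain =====

-- B replaces the prefix-sum list and backward value-keyed DP chain by one forward
-- segment-flushing pass with a running sum and setdefault; same result, same O(n log n) cost.

-- ===== PORT A =====
-- the body of A's backward loop, step for step
def stepA (n : Int) (sorted_list prefixL : List Int) (dp : PySem.Dict Int Int) (i : Int) :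
    PySem.Dict Int Int :=
  if i = n - 1 then
    dp.insert (PySem.List.pyGetD sorted_list i 0) (n - 1)
  else
    let pre := PySem.List.pyGetD prefixL i 0
    let val := PySem.List.pyGetD sorted_list i 0
    let nxt := PySem.List.pyGetD sorted_list (i + 1) 0
    if pre ≥ nxt then dp.insert val (dp.getD nxt 0) else dp.insert val i

def solve (test : List Int) : String :=
  let sorted_list := PySem.List.sorted test (fun x => x) false
  let prefixL := sorted_list.foldl
    (fun pr i => if pr.length = 0 then pr ++ [i] else pr ++ [PySem.List.pyGetD pr (-1) 0 + i])
    []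
  let n := PySem.List.len sorted_list
  let dp := (PySem.List.pyRange (n - 1) (-1) (-1)).foldl (stepA n sorted_list prefixL)
    PySem.Dict.empty
  let ret := test.foldl (fun r i => r ++ [dp.getD i 0]) ([] : List Int)
  PySem.Str.join " " (ret.map PySem.Int.toStr)

-- ===== PORT B =====
-- the body of B's forward loop: extend the segment and running sum; on a break,
-- flush the segment into the dict with setdefault
def stepB (n : Int) (s : List Int) (st : PySem.Dict Int Int × Int × List Int) (p : Int × Int) :
    PySem.Dict Int Int × Int × List Int :=
  let seg := st.2.2 ++ [p.2]
  let run := st.2.1 + p.2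
  if p.1 = n - 1 ∨ run < PySem.List.pyGetD s (p.1 + 1) 0 then
    (seg.foldl (fun d w => d.setdefault w p.1) st.1, run, ([] : List Int))
  else (st.1, run, seg)

def solve_alt (test : List Int) : String :=
  let s := PySem.List.sorted test (fun x => x) false
  let n := PySem.List.len s
  let st := (PySem.List.enumerate s 0).foldl (stepB n s) (PySem.Dict.empty, 0, [])
  PySem.Str.join " " (test.map (fun x => PySem.Int.toStr (st.1.getD x 0)))

-- ===== PRECONDITION & SPEC =====
def Spec_solve (test : List Int) (out : String) : Prop := out = solve_alt test
instance (test : List Int) (out : String) : Decidable (Spec_solve test out) := by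
  unfold Spec_solve; infer_instance

-- ===== CLAIM (what is proved, stated in full; the proofs are below) =====
def Claim_equal_solve : Prop := ∀ (test : List Int), Dom_solve test → Spec_solve test (solve test)

-- ===== LEMMAS AND PROOFS =====

-- first index of v in a list
def fIdx (v : Int) : List Int → Option Nat
  | [] => none
  | x :: t => if x = v then some 0 else (fIdx v t).map (· + 1)

-- "index k is a segment break": last index, or prefix-sum up to k below the next element
def brkB (s : List Int) (k : Nat) : Bool :=
  (k == s.length - 1) || decide ((s.take (k + 1)).sum < s.getD (k + 1) 0)

-- next break at or after k
def nb (s : List Int) (k : Nat) : Nat :=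
  if _h : k + 1 < s.length then (if brkB s k then k else nb s (k + 1)) else k
termination_by s.length - k
decreasing_by omega

-- running sums starting from c
def runSums (c : Int) : List Int → List Int
  | [] => []
  | i :: t => (c + i) :: runSums (c + i) t

theorem getD_runSums (c : Int) (l : List Int) (k : Nat) (hk : k < l.length) :
    (runSums c l).getD k 0 = c + (l.take (k + 1)).sum := by
  induction l generalizing c k with
  | nil => simp at hk
  | cons i t ih =>
    cases k with
    | zero => simp [runSums]
    | succ k =>
      simp only [runSums, List.getD_cons_succ, List.take_succ_cons, List.sum_cons]
      rw [ih (c + i) k (by simpa using hk)]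
      ring

theorem foldPrefix (l : List Int) (pr : List Int) :
    l.foldl
      (fun pr i => if pr.length = 0 then pr ++ [i] else pr ++ [PySem.List.pyGetD pr (-1) 0 + i])
      pr
    = pr ++ runSums (PySem.List.pyGetD pr (-1) 0) l := by
  induction l generalizing pr with
  | nil => simp [runSums]
  | cons i t ih =>
    have hstep : (if pr.length = 0 then pr ++ [i]
        else pr ++ [PySem.List.pyGetD pr (-1) 0 + i])
        = pr ++ [PySem.List.pyGetD pr (-1) 0 + i] := by
      rcases pr with _ | ⟨x, xs⟩
      · norm_num
        decide
      · simp
    simp only [List.foldl_cons, hstep, ih, PySem.List.pyGetD_neg_one_append_singleton]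
    simp [runSums]

theorem nb_last (s : List Int) (k : Nat) (h : ¬ k + 1 < s.length) : nb s k = k := by
  unfold nb; simp [h]

theorem nb_brk (s : List Int) (k : Nat) (h : brkB s k = true) : nb s k = k := by
  unfold nb; split_ifs <;> simp_all

theorem nb_step (s : List Int) (k : Nat) (h1 : k + 1 < s.length) (h2 : brkB s k = false) :
    nb s k = nb s (k + 1) := by
  rw [nb]; simp [h1, h2]

-- between t and a break i with no break strictly before i, nb is i
theorem nb_const (s : List Int) (i : Nat) (hi : i < s.length) (hbi : brkB s i = true)
    (k : Nat) (hk : k ≤ i) (hfree : ∀ j, k ≤ j → j < i → brkB s j = false) :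
    nb s k = i := by
  induction hd : i - k generalizing k with
  | zero =>
    have : k = i := by omega
    subst this
    by_cases h1 : k + 1 < s.length
    · exact nb_brk s k hbi
    · exact nb_last s k h1
  | succ d ihd =>
    have hki : k < i := by omega
    rw [nb_step s k (by omega) (hfree k le_rfl hki)]
    exact ihd (k + 1) (by omega) (fun j h1 h2 => hfree j (by omega) h2) (by omega)

theorem fIdx_lt_length (v : Int) (l : List Int) (j : Nat) (h : fIdx v l = some j) :
    j < l.length := by
  induction l generalizing j with
  | nil => simp [fIdx] at h
  | cons x t ih =>
    simp only [fIdx] at h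
    split at h
    · cases h; simp
    · cases ht : fIdx v t with
      | none => rw [ht] at h; simp at h
      | some k =>
        rw [ht] at h
        simp only [Option.map_some, Option.some.injEq] at h
        have := ih k ht
        simp only [List.length_cons]
        omega

-- flushing a segment with setdefault: existing keys keep their value, new keys get c
theorem fold_setdefault (seg : List Int) (dp : PySem.Dict Int Int) (c : Int) (v : Int) :
    (seg.foldl (fun d w => d.setdefault w c) dp).get? v
    = match dp.get? v with
      | some x => some x
      | none => (fIdx v seg).map (fun _ => c) := by
  induction seg generalizing dp with
  | nil => cases h : dp.get? v <;> simp [fIdx, h]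
  | cons w tl ih =>
    simp only [List.foldl_cons]
    rw [ih]
    by_cases hv : v = w
    · subst hv
      rw [PySem.Dict.get?_setdefault_self]
      cases h : dp.get? v <;> simp [fIdx, h]
    · rw [PySem.Dict.get?_setdefault_of_ne _ _ hv]
      cases h : dp.get? v <;> simp [fIdx, h, Ne.symm hv] <;>
        cases ht : fIdx v tl <;> simp [ht]

theorem fIdx_append (v : Int) (xs ys : List Int) :
    fIdx v (xs ++ ys)
    = match fIdx v xs with
      | some k => some k
      | none => (fIdx v ys).map (· + xs.length) := by
  induction xs with
  | nil => cases h : fIdx v ys <;> simp [fIdx, h]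
  | cons x t ih =>
    by_cases hx : x = v
    · simp [fIdx, hx]
    · simp only [List.cons_append, fIdx, if_neg hx, ih]
      cases h1 : fIdx v t
      · cases h2 : fIdx v ys <;> simp [h1, h2] <;> omega
      · simp [h1]

-- inserting s[m] with value nb s m pushes the invariant from m+1 down to m
theorem inv_insert (s : List Int) (dp : PySem.Dict Int Int) (m : Nat) (hm : m < s.length)
    (hdp : ∀ v, dp.get? v = (fIdx v (s.drop (m + 1))).map (fun k => ((nb s (m + 1 + k) : Nat) : Int)))
    (value : Int) (hval : value = ((nb s m : Nat) : Int)) (v : Int) :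
    (dp.insert (s.getD m 0) value).get? v
    = (fIdx v (s.drop m)).map (fun k => ((nb s (m + k) : Nat) : Int)) := by
  have hget : s.getD m 0 = s[m] := List.getD_eq_getElem s 0 hm
  have hdrop : s.drop m = s.getD m 0 :: s.drop (m + 1) := by
    rw [hget, List.getElem_cons_drop]
  rw [PySem.Dict.get?_insert, hdrop]
  by_cases hv : v = s.getD m 0
  · simp [hv, fIdx, hval]
  · rw [if_neg hv]
    simp only [fIdx, if_neg (Ne.symm hv), hdp v, Option.map_map]
    cases h : fIdx v (s.drop (m + 1)) with
    | none => simp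
    | some k =>
      simp only [Option.map_some, Function.comp]
      have : m + 1 + k = m + (k + 1) := by omega
      rw [this]

-- A's backward loop establishes: dp[v] = nb at the first occurrence of v
theorem foldA_inv (s prefixL : List Int)
    (hpre : ∀ k : Nat, k < s.length → prefixL.getD k 0 = (s.take (k + 1)).sum) :
    ∀ (i : Nat), i ≤ s.length → ∀ (dp : PySem.Dict Int Int),
      (∀ v, dp.get? v = (fIdx v (s.drop i)).map (fun k => ((nb s (i + k) : Nat) : Int))) →
      ∀ v, ((PySem.List.pyRange ((i : Int) - 1) (-1) (-1)).foldl
              (stepA (PySem.List.len s) s prefixL) dp).get? v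
           = (fIdx v s).map (fun k => ((nb s k : Nat) : Int)) := by
  intro i
  induction i with
  | zero =>
    intro _ dp hdp v
    rw [show ((0 : Nat) : Int) - 1 = (-1 : Int) by norm_num,
      PySem.List.pyRange_neg_one_eq_nil le_rfl]
    simpa using hdp v
  | succ m ih =>
    intro hle dp hdp v
    have hm : m < s.length := by omega
    have hrange : PySem.List.pyRange (((m + 1 : Nat) : Int) - 1) (-1) (-1)
        = (m : Int) :: PySem.List.pyRange ((m : Int) - 1) (-1) (-1) := by
      have h1 : ((m + 1 : Nat) : Int) - 1 = (m : Int) := by push_cast; ring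
      rw [h1, PySem.List.pyRange_neg_one_cons (by omega)]
    rw [hrange, List.foldl_cons]
    refine ih (by omega) _ ?_ v
    intro w
    simp only [stepA, PySem.List.len_eq]
    by_cases hlast : (m : Int) = (s.length : Int) - 1
    · rw [if_pos hlast]
      simp only [PySem.List.pyGetD_natCast]
      refine inv_insert s dp m hm hdp _ ?_ w
      rw [nb_last s m (by omega)]
      omega
    · rw [if_neg hlast]
      have hm1 : m + 1 < s.length := by omega
      have hnxt : PySem.List.pyGetD s ((m : Int) + 1) 0 = s.getD (m + 1) 0 := by
        rw [show ((m : Int) + 1) = ((m + 1 : Nat) : Int) by push_cast; ring,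
          PySem.List.pyGetD_natCast]
      have hpre' : PySem.List.pyGetD prefixL (m : Int) 0 = (s.take (m + 1)).sum := by
        rw [PySem.List.pyGetD_natCast]; exact hpre m hm
      rw [hnxt, hpre']
      simp only [PySem.List.pyGetD_natCast]
      have hne : m ≠ s.length - 1 := by omega
      split_ifs with hge
      · -- no break at m: chain to dp[next]
        have hbrk : brkB s m = false := by
          have h2 : ¬ ((s.take (m + 1)).sum < s[m + 1]?.getD 0) := by
            simpa [List.getD] using not_lt.mpr hge
          simp [brkB, hne, h2]
        refine inv_insert s dp m hm hdp _ ?_ w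
        have hdrop1 : s.drop (m + 1) = s.getD (m + 1) 0 :: s.drop (m + 2) := by
          rw [List.getD_eq_getElem s 0 hm1, List.getElem_cons_drop]
        rw [PySem.Dict.getD_eq_get?_getD, hdp, hdrop1]
        simp [fIdx, nb_step s m hm1 hbrk]
      · -- break at m
        have hbrk : brkB s m = true := by
          have h2 : (s.take (m + 1)).sum < s[m + 1]?.getD 0 := by
            simpa [List.getD] using lt_of_not_ge hge
          simp [brkB, h2]
        refine inv_insert s dp m hm hdp _ ?_ w
        rw [nb_brk s m hbrk]

-- B's forward loop establishes the same characterisation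
theorem foldB_inv (s : List Int) :
    ∀ (fuel i : Nat), s.length - i = fuel → i ≤ s.length →
      ∀ (dp : PySem.Dict Int Int) (t : Nat) (run : Int),
      t ≤ i → run = (s.take i).sum →
      (∀ j, t ≤ j → j < i → brkB s j = false) →
      (∀ v, dp.get? v = (fIdx v (s.take t)).map (fun k => ((nb s k : Nat) : Int))) →
      ∀ v, (((PySem.List.enumerate (s.drop i) i).foldl (stepB (PySem.List.len s) s)
              (dp, run, (s.drop t).take (i - t))).1).get? v
           = (fIdx v s).map (fun k => ((nb s k : Nat) : Int)) := by
  intro fuel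
  induction fuel with
  | zero =>
    intro i hfi hle dp t run ht hrun hfree hdp v
    have hin : i = s.length := by omega
    subst hin
    rw [List.drop_length, PySem.List.enumerate_nil, List.foldl_nil]
    have ht' : t = s.length := by
      by_contra hne
      have hb : brkB s (s.length - 1) = true := by simp [brkB]
      rw [hfree (s.length - 1) (by omega) (by omega)] at hb
      cases hb
    rw [hdp v, ht', List.take_length]
  | succ d ihd =>
    intro i hfi hle dp t run ht hrun hfree hdp v
    have hi : i < s.length := by omega
    have hdropc : s.drop i = s.getD i 0 :: s.drop (i + 1) := by
      rw [List.getD_eq_getElem s 0 hi, List.getElem_cons_drop]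
    rw [hdropc, PySem.List.enumerate_cons, List.foldl_cons]
    have hcast : (i : Int) + 1 = ((i + 1 : Nat) : Int) := by push_cast; ring
    have hrun' : run + s.getD i 0 = (s.take (i + 1)).sum := by
      rw [hrun, List.take_add_one, List.getElem?_eq_getElem hi, List.sum_append]
      simp [List.getD, List.getElem?_eq_getElem hi]
    have hsegfull : (s.drop t).take (i - t) ++ [s.getD i 0] = (s.drop t).take (i + 1 - t) := by
      have h1 : i + 1 - t = (i - t) + 1 := by omega
      rw [h1, List.take_add_one, List.getElem?_drop, show t + (i - t) = i by omega,
        List.getElem?_eq_getElem hi]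
      simp [List.getD, List.getElem?_eq_getElem hi]
    simp only [stepB, PySem.List.len_eq]
    rw [hcast, PySem.List.pyGetD_natCast]
    split_ifs with hc
    · -- break at i: flush the segment
      have hbrk : brkB s i = true := by
        rcases hc with hc | hc
        · have : i = s.length - 1 := by omega
          simp [brkB, this]
        · have h2 : run + s.getD i 0 < s[i + 1]?.getD 0 := by
            simpa [List.getD] using hc
          rw [hrun'] at h2
          simp [brkB, h2]
      have hdp' : ∀ w, (((s.drop t).take (i - t) ++ [s.getD i 0]).foldl
            (fun d w => d.setdefault w (i : Int)) dp).get? w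
          = (fIdx w (s.take (i + 1))).map (fun k => ((nb s k : Nat) : Int)) := by
        intro w
        rw [fold_setdefault, hsegfull,
          show s.take (i + 1) = s.take t ++ (s.drop t).take (i + 1 - t) by
            rw [← List.take_add]; congr 1; omega,
          fIdx_append, hdp w]
        have hlent : (s.take t).length = t := List.length_take_of_le (by omega)
        cases h1 : fIdx w (s.take t) with
        | some k => simp
        | none =>
          cases h2 : fIdx w ((s.drop t).take (i + 1 - t)) with
          | none => simp
          | some j =>
            have hj : j < i + 1 - t := by
              have h3 := fIdx_lt_length w _ _ h2
              have hlen2 : ((s.drop t).take (i + 1 - t)).length ≤ i + 1 - t := by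
                simp
              omega
            simp only [Option.map_none, Option.map_some, hlent]
            rw [nb_const s i hi hbrk (j + t) (by omega)
              (fun j' h1' h2' => hfree j' (by omega) h2')]
      have := ihd (i + 1) (by omega) (by omega)
        (((s.drop t).take (i - t) ++ [s.getD i 0]).foldl
            (fun d w => d.setdefault w (i : Int)) dp)
        (i + 1) (run + s.getD i 0) le_rfl hrun'
        (fun j h1 h2 => absurd (lt_of_lt_of_le h2 h1) (lt_irrefl j)) hdp' v
      simpa using this
    · -- no break at i: extend the segment
      have hbrk : brkB s i = false := by
        push_neg at hc
        obtain ⟨hc1, hc2⟩ := hc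
        have hne : i ≠ s.length - 1 := by omega
        have h2 : ¬ (s.take (i + 1)).sum < s[i + 1]?.getD 0 := by
          rw [← hrun']
          simpa [List.getD] using hc2
        simp [brkB, hne, h2]
      have := ihd (i + 1) (by omega) (by omega) dp t (run + s.getD i 0) (by omega)
        hrun'
        (fun j h1 h2 => by
          rcases Nat.lt_succ_iff_lt_or_eq.mp h2 with h | h
          · exact hfree j h1 h
          · subst h; exact hbrk) hdp v
      rw [hsegfull]
      simpa using this

theorem foldl_append_map (g : Int → Int) (l : List Int) (acc : List Int) :
    l.foldl (fun r i => r ++ [g i]) acc = acc ++ l.map g := by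
  induction l generalizing acc with
  | nil => simp
  | cons x t ih => simp [ih]

-- ===== VERDICT (by name: the statement is the Claim_ definition above) =====
theorem solve_spec : Claim_equal_solve := by
  unfold Claim_equal_solve Spec_solve
  intro test _
  simp only [solve, solve_alt]
  rw [foldPrefix]
  have h0 : PySem.List.pyGetD ([] : List Int) (-1) 0 = 0 := by decide
  rw [h0]
  set s := PySem.List.sorted test (fun x => x) false with hs
  have hpre : ∀ k, k < s.length → (runSums 0 s).getD k 0 = (s.take (k + 1)).sum := by
    intro k hk
    rw [getD_runSums 0 s k hk]
    ring
  have hA : ∀ v, ((PySem.List.pyRange (PySem.List.len s - 1) (-1) (-1)).foldl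
        (stepA (PySem.List.len s) s (runSums 0 s)) PySem.Dict.empty).get? v
      = (fIdx v s).map (fun k => ((nb s k : Nat) : Int)) := by
    intro v
    have hinit : ∀ w, (PySem.Dict.empty : PySem.Dict Int Int).get? w
        = (fIdx w (s.drop s.length)).map (fun k => ((nb s (s.length + k) : Nat) : Int)) := by
      intro w
      simp [fIdx, List.drop_length, PySem.Dict.get?_empty]
    have := foldA_inv s (runSums 0 s) hpre s.length le_rfl PySem.Dict.empty hinit v
    simpa [PySem.List.len_eq] using this
  have hB : ∀ v, (((PySem.List.enumerate s 0).foldl (stepB (PySem.List.len s) s)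
        (PySem.Dict.empty, 0, ([] : List Int))).1).get? v
      = (fIdx v s).map (fun k => ((nb s k : Nat) : Int)) := by
    intro v
    have hinit : ∀ w, (PySem.Dict.empty : PySem.Dict Int Int).get? w
        = (fIdx w (s.take 0)).map (fun k => ((nb s k : Nat) : Int)) := by
      intro w
      simp [fIdx, PySem.Dict.get?_empty]
    have := foldB_inv s s.length 0 (by omega) (by omega) PySem.Dict.empty 0 0 le_rfl
      (by simp) (fun j h1 h2 => absurd h2 (by omega)) hinit v
    simpa using this
  rw [foldl_append_map]
  simp only [List.nil_append, List.map_map]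
  congr 1
  refine List.map_congr_left ?_
  intro x _
  simp only [Function.comp]
  congr 1
  rw [PySem.Dict.getD_eq_get?_getD, PySem.Dict.getD_eq_get?_getD, hA x, hB x]
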